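-- pv_equiv track=rewrite | github.com/inzoddwetrust/talentir | templates.py | merge_buttons
-- ===== SOURCE A (Python) =====
-- from typing import Optional, Dict, Tuple, List, Union, Any
--
-- def merge_buttons(buttons_list: List[str]) -> str:
--     """Merges multiple button configurations into a single string."""
--     valid_configs = [b.strip() for b in buttons_list if b and b.strip()]
--     if not valid_configs:
--         return ''
--
--     # Collect all rows from each configuration
--     all_rows = []
--
--     for config in valid_configs:
--         # Split by newlines
--         rows = config.split('\n')
--
--         # Add each non-empty row
--         for row in rows:
--             if row.strip():
--                 all_rows.append(row.strip())
--
--     # Join all rows with newlines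
--     return '\n'.join(all_rows)
-- ===== SOURCE B (Python) =====
-- from typing import List
--
-- def merge_buttons(buttons_list: List[str]) -> str:
--     """Merges multiple button configurations into a single string."""
--     # Flatten first: one combined block, then a single line-level pass.
--     combined = '\n'.join(b for b in buttons_list if b)
--     kept = [line.strip() for line in combined.split('\n')]
--     return '\n'.join(line for line in kept if line)
-- ===== Notes on version B (the rewrite author's own statement) =====
-- stated objective: simpler
-- what changed: Replaces A's two-level structure (filter/strip configs, then a nested loop splitting each config and collecting rows into an accumulator) by flattening first: join all truthy configs into one block and make a single flat strip-and-filter pass over its lines.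
import Mathlib
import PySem

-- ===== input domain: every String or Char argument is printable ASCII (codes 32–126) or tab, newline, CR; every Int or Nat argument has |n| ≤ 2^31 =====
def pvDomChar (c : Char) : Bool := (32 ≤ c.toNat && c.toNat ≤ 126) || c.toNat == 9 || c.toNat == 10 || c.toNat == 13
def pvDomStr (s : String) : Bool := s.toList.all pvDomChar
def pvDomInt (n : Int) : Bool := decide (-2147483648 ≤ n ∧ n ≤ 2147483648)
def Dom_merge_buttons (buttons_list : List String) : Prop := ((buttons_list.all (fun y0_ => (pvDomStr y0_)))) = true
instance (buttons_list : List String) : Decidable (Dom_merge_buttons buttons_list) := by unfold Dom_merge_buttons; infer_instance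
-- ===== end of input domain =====

-- B flattens first (join all truthy configs, then one strip-and-filter pass over the lines)
-- instead of A's nested per-config row loop; same result, no speed claim.

-- ===== PORT A =====
def merge_buttons (buttons_list : List String) : String :=
  let valid_configs :=
    (buttons_list.filter (fun b => !(b == "") && !(PySem.Str.strip b == ""))).map PySem.Str.strip
  if valid_configs.isEmpty then ""
  else
    let all_rows := valid_configs.foldl (fun acc config =>
      let rows := (PySem.Str.split? config "\n").getD []
      rows.foldl (fun acc2 row =>
        if !(PySem.Str.strip row == "") then acc2 ++ [PySem.Str.strip row] else acc2) acc) []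
    PySem.Str.join "\n" all_rows

-- ===== PORT B =====
def merge_buttons_alt (buttons_list : List String) : String :=
  let combined := PySem.Str.join "\n" (buttons_list.filter (fun b => !(b == "")))
  let kept := ((PySem.Str.split? combined "\n").getD []).map PySem.Str.strip
  PySem.Str.join "\n" (kept.filter (fun line => !(line == "")))

-- ===== PRECONDITION & SPEC =====
def Spec_merge_buttons (buttons_list : List String) (out : String) : Prop := out = merge_buttons_alt buttons_list
instance (buttons_list : List String) (out : String) : Decidable (Spec_merge_buttons buttons_list out) := by unfold Spec_merge_buttons; infer_instance

-- ===== CLAIM (what is proved, stated in full; the proofs are below) =====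
def Claim_equal_merge_buttons : Prop := ∀ (buttons_list : List String), Dom_merge_buttons buttons_list → Spec_merge_buttons buttons_list (merge_buttons buttons_list)

-- ===== LEMMAS AND PROOFS =====

/-- Structural split-on-`'\n'`: pair (first line, remaining lines). -/
def pvMsp (l : List Char) : List Char × List (List Char) :=
  l.foldr (fun x p => if x = '\n' then ([], p.1 :: p.2) else (x :: p.1, p.2)) ([], [])

/-- The list of lines of `l` (always nonempty). -/
def pvS (l : List Char) : List (List Char) := (pvMsp l).1 :: (pvMsp l).2

/-- The stripped non-blank rows of a config. -/
def pvRows (l : List Char) : List (List Char) :=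
  ((pvS l).map PySem.Chars.strip).filter (· ≠ [])

theorem pvMsp_nil : pvMsp [] = ([], []) := rfl

theorem pvMsp_cons (x : Char) (l : List Char) :
    pvMsp (x :: l) = if x = '\n' then ([], (pvMsp l).1 :: (pvMsp l).2)
      else (x :: (pvMsp l).1, (pvMsp l).2) := rfl

theorem pvGo_eq (fuel : Nat) (l cur : List Char) (acc : List (List Char))
    (h : l.length < fuel) :
    PySem.Chars.splitOn.go ['\n'] fuel l cur acc
      = acc.reverse ++ ((cur.reverse ++ (pvMsp l).1) :: (pvMsp l).2) := by
  induction fuel generalizing l cur acc with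
  | zero => omega
  | succ fuel ih =>
    cases l with
    | nil => simp [PySem.Chars.splitOn.go, pvMsp_nil]
    | cons c rest =>
      rw [pvMsp_cons]
      by_cases hc : c = '\n'
      · subst hc
        have hpre : List.isPrefixOf ['\n'] ('\n' :: rest) = true := by
          simp [List.isPrefixOf]
        simp only [PySem.Chars.splitOn.go, hpre, if_true, List.length_cons, List.length_nil,
          List.drop_succ_cons, List.drop_zero]
        rw [ih rest [] (cur.reverse :: acc) (by simpa using Nat.lt_of_succ_lt_succ h)]
        simp
      · have hpre : List.isPrefixOf ['\n'] (c :: rest) = false := by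
          simp [List.isPrefixOf, Ne.symm hc]
        simp only [PySem.Chars.splitOn.go, hpre, Bool.false_eq_true, if_false, if_neg hc]
        rw [ih rest (c :: cur) acc (by simpa using Nat.lt_of_succ_lt_succ h)]
        simp

theorem pvSplitOn_eq (l : List Char) : PySem.Chars.splitOn l ['\n'] = pvS l := by
  unfold PySem.Chars.splitOn
  rw [pvGo_eq l.length.succ l [] [] (Nat.lt_succ_self _)]
  simp [pvS]

/-- Fold with seed on the `pvMsp` step: the last line of `a` is glued to `f`. -/
def pvJoinLast : List (List Char) → List Char → List (List Char)
  | [], f => [f]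
  | [u], f => [u ++ f]
  | u :: v :: t, f => u :: pvJoinLast (v :: t) f

theorem pvJoinLast_nil_right : ∀ (xs : List (List Char)), xs ≠ [] → pvJoinLast xs [] = xs := by
  intro xs
  induction xs with
  | nil => simp
  | cons u t ih =>
    intro _
    cases t with
    | nil => simp [pvJoinLast]
    | cons v t' => simp [pvJoinLast, ih (by simp)]

theorem pvJoinLast_append (ys : List (List Char)) (u f : List Char) :
    pvJoinLast (ys ++ [u]) f = ys ++ [u ++ f] := by
  induction ys with
  | nil => simp [pvJoinLast]
  | cons a ys ih =>
    cases ys with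
    | nil => simp [pvJoinLast]
    | cons b ys' => simpa [pvJoinLast] using ih

theorem pvSeed (a : List Char) (f : List Char) (r : List (List Char)) :
    (a.foldr (fun x p => if x = '\n' then ([], p.1 :: p.2) else (x :: p.1, p.2)) (f, r)).1
      :: (a.foldr (fun x p => if x = '\n' then ([], p.1 :: p.2) else (x :: p.1, p.2)) (f, r)).2
      = pvJoinLast (pvS a) f ++ r := by
  induction a with
  | nil => simp [pvS, pvMsp, pvJoinLast]
  | cons x a ih =>
    simp only [List.foldr_cons]
    by_cases hx : x = '\n'
    · subst hx
      rw [if_pos rfl]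
      have hS : pvS ('\n' :: a) = [] :: pvS a := by
        simp [pvS, pvMsp_cons]
      rw [hS]
      cases hSa : pvS a with
      | nil => simp [pvS] at hSa
      | cons v t =>
        have h2 := congrArg (List.cons ([] : List Char)) ih
        simpa [pvJoinLast, hSa] using h2
    · rw [if_neg hx]
      have hS : pvS (x :: a) = (x :: (pvMsp a).1) :: (pvMsp a).2 := by
        simp [pvS, pvMsp_cons, hx]
      rw [hS]
      cases ht : (pvMsp a).2 with
      | nil =>
        have hSa : pvS a = [(pvMsp a).1] := by simp [pvS, ht]
        simp only [pvJoinLast]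
        have := ih
        rw [hSa] at this
        simp only [pvJoinLast] at this
        obtain ⟨h1, h2⟩ := List.cons.injEq .. ▸ this
        simp only [List.cons_append] at this
        have h1' : (List.foldr (fun x p => if x = '\n' then ([], p.1 :: p.2) else (x :: p.1, p.2)) (f, r) a).1 = (pvMsp a).1 ++ f := by
          exact (List.cons_eq_cons.mp this).1
        have h2' : (List.foldr (fun x p => if x = '\n' then ([], p.1 :: p.2) else (x :: p.1, p.2)) (f, r) a).2 = r := by
          exact (List.cons_eq_cons.mp this).2
        rw [h1', h2']
        simp
      | cons v t' =>
        have hSa : pvS a = (pvMsp a).1 :: v :: t' := by simp [pvS, ht]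
        simp only [pvJoinLast]
        have := ih
        rw [hSa] at this
        simp only [pvJoinLast, List.cons_append] at this
        have h1' : (List.foldr (fun x p => if x = '\n' then ([], p.1 :: p.2) else (x :: p.1, p.2)) (f, r) a).1 = (pvMsp a).1 := (List.cons_eq_cons.mp this).1
        have h2' : (List.foldr (fun x p => if x = '\n' then ([], p.1 :: p.2) else (x :: p.1, p.2)) (f, r) a).2 = pvJoinLast (v :: t') f ++ r := (List.cons_eq_cons.mp this).2
        rw [h1', h2']
        simp

theorem pvS_glue (a b : List Char) :
    pvS (a ++ b) = pvJoinLast (pvS a) (pvMsp b).1 ++ (pvMsp b).2 := by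
  have h : pvMsp (a ++ b) = a.foldr (fun x p => if x = '\n' then ([], p.1 :: p.2) else (x :: p.1, p.2)) (pvMsp b) := by
    simp [pvMsp, List.foldr_append]
  have h2 := pvSeed a (pvMsp b).1 (pvMsp b).2
  simpa [pvS, h] using h2

theorem pvS_sep (a t : List Char) : pvS (a ++ '\n' :: t) = pvS a ++ pvS t := by
  rw [pvS_glue]
  have h : pvMsp ('\n' :: t) = ([], (pvMsp t).1 :: (pvMsp t).2) := by
    simp [pvMsp_cons]
  rw [h, pvJoinLast_nil_right (pvS a) (by simp [pvS])]
  rfl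

theorem pvS_snoc (s : List Char) (x : Char) (hx : x ≠ '\n') :
    pvS (s ++ [x]) = pvJoinLast (pvS s) [x] := by
  rw [pvS_glue]
  have h : pvMsp [x] = ([x], []) := by simp [pvMsp, hx]
  rw [h]
  simp

theorem pvS_reverse (s : List Char) :
    pvS s.reverse = ((pvS s).map List.reverse).reverse := by
  induction s with
  | nil => rfl
  | cons x r ih =>
    by_cases hx : x = '\n'
    · subst hx
      have h1 : ('\n' :: r).reverse = r.reverse ++ '\n' :: [] := by simp
      rw [h1, pvS_sep, ih]
      have h2 : pvS ('\n' :: r) = [] :: pvS r := by simp [pvS, pvMsp_cons]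
      rw [h2]
      simp [pvS, pvMsp]
    · have h1 : (x :: r).reverse = r.reverse ++ [x] := by simp
      rw [h1, pvS_snoc _ _ hx, ih]
      have h2 : pvS (x :: r) = (x :: (pvMsp r).1) :: (pvMsp r).2 := by
        simp [pvS, pvMsp_cons, hx]
      rw [h2]
      cases hSr : pvS r with
      | nil => simp [pvS] at hSr
      | cons v t =>
        have hv : (pvMsp r).1 = v := by
          have := hSr; simp [pvS] at this; exact this.1
        have ht : (pvMsp r).2 = t := by
          have := hSr; simp [pvS] at this; exact this.2
        rw [hv, ht]
        simp only [List.map_cons, List.reverse_cons]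
        rw [pvJoinLast_append]

theorem pvLstrip_cons (x : Char) (r : List Char) :
    PySem.Chars.lstrip (x :: r)
      = if PySem.Chars.isspace x then PySem.Chars.lstrip r else x :: r := by
  simp [PySem.Chars.lstrip, List.dropWhile_cons]

theorem pvRstrip_cons (x : Char) (r : List Char) :
    PySem.Chars.rstrip (x :: r)
      = if PySem.Chars.rstrip r = [] then (if PySem.Chars.isspace x then [] else [x])
        else x :: PySem.Chars.rstrip r := by
  simp only [PySem.Chars.rstrip, List.reverse_cons, List.dropWhile_append]
  by_cases h : List.dropWhile PySem.Chars.isspace r.reverse = []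
  · by_cases hx : PySem.Chars.isspace x <;>
      simp [h, hx]
  · simp [h, List.reverse_eq_nil_iff, List.isEmpty_iff]

theorem pvStrip_comm (w : List Char) :
    PySem.Chars.lstrip (PySem.Chars.rstrip w) = PySem.Chars.rstrip (PySem.Chars.lstrip w) := by
  induction w with
  | nil => rfl
  | cons x r ih =>
    rw [pvRstrip_cons, pvLstrip_cons]
    by_cases h : PySem.Chars.rstrip r = []
    · rw [if_pos h]
      by_cases hx : PySem.Chars.isspace x
      · rw [if_pos hx, if_pos hx, ← ih, h]
      · rw [if_neg hx, if_neg hx, pvRstrip_cons, if_pos h, if_neg hx]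
        simp [PySem.Chars.lstrip, hx]
    · rw [if_neg h]
      by_cases hx : PySem.Chars.isspace x
      · rw [if_pos hx, pvLstrip_cons, if_pos hx, ← ih]
      · rw [if_neg hx, pvLstrip_cons, if_neg hx, pvRstrip_cons, if_neg h]

theorem pvStrip_reverse (u : List Char) :
    PySem.Chars.strip u.reverse = (PySem.Chars.strip u).reverse := by
  have hr : ∀ w : List Char, PySem.Chars.rstrip w = (PySem.Chars.lstrip w.reverse).reverse := by
    intro w; simp [PySem.Chars.rstrip, PySem.Chars.lstrip]
  have hl : PySem.Chars.lstrip u.reverse = (PySem.Chars.rstrip u).reverse := by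
    rw [hr u]; simp
  calc PySem.Chars.strip u.reverse
      = PySem.Chars.rstrip (PySem.Chars.lstrip u.reverse) := rfl
    _ = PySem.Chars.rstrip ((PySem.Chars.rstrip u).reverse) := by rw [hl]
    _ = (PySem.Chars.lstrip (PySem.Chars.rstrip u)).reverse := by
          rw [hr ((PySem.Chars.rstrip u).reverse)]; simp
    _ = (PySem.Chars.rstrip (PySem.Chars.lstrip u)).reverse := by rw [pvStrip_comm]
    _ = (PySem.Chars.strip u).reverse := rfl

theorem pvRows_reverse (s : List Char) :
    pvRows s.reverse = ((pvRows s).map List.reverse).reverse := by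
  unfold pvRows
  rw [pvS_reverse]
  simp only [List.map_reverse, List.filter_reverse, List.map_map]
  congr 1
  have hstrip : PySem.Chars.strip ∘ List.reverse = List.reverse ∘ PySem.Chars.strip := by
    funext u
    simpa using pvStrip_reverse u
  rw [hstrip, ← List.map_map, List.filter_map]
  congr 1
  apply List.filter_congr
  intro u _
  simp

theorem pvStrip_cons_space (x : Char) (u : List Char) (hx : PySem.Chars.isspace x = true) :
    PySem.Chars.strip (x :: u) = PySem.Chars.strip u := by
  show PySem.Chars.rstrip (PySem.Chars.lstrip (x :: u)) = _
  rw [pvLstrip_cons, if_pos hx]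
  rfl

theorem pvRows_lstrip (s : List Char) : pvRows (PySem.Chars.lstrip s) = pvRows s := by
  induction s with
  | nil => rfl
  | cons x r ih =>
    rw [pvLstrip_cons]
    by_cases hx : PySem.Chars.isspace x
    · rw [if_pos hx, ih]
      by_cases hn : x = '\n'
      · subst hn
        have hS : pvS ('\n' :: r) = [] :: pvS r := by simp [pvS, pvMsp_cons]
        unfold pvRows
        rw [hS]
        simp [PySem.Chars.strip, PySem.Chars.lstrip, PySem.Chars.rstrip]
      · have hS : pvS (x :: r) = (x :: (pvMsp r).1) :: (pvMsp r).2 := by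
          simp [pvS, pvMsp_cons, hn]
        unfold pvRows
        rw [hS]
        have hSr : pvS r = (pvMsp r).1 :: (pvMsp r).2 := rfl
        rw [hSr]
        simp [pvStrip_cons_space _ _ hx]
    · rw [if_neg hx]

theorem pvRows_rstrip (s : List Char) : pvRows (PySem.Chars.rstrip s) = pvRows s := by
  have h : PySem.Chars.rstrip s = (PySem.Chars.lstrip s.reverse).reverse := by
    simp [PySem.Chars.rstrip, PySem.Chars.lstrip]
  rw [h, pvRows_reverse, pvRows_lstrip, pvRows_reverse]
  simp [List.map_map]

theorem pvRows_strip (s : List Char) : pvRows (PySem.Chars.strip s) = pvRows s := by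
  show pvRows (PySem.Chars.rstrip (PySem.Chars.lstrip s)) = _
  rw [pvRows_rstrip, pvRows_lstrip]

theorem pvSplitStr (config : String) :
    (PySem.Str.split? config "\n").getD []
      = (pvS config.toList).map String.ofList := by
  have h := PySem.Str.split?_map config "\n"
  have hsep : ("\n" : String).toList = ['\n'] := rfl
  rw [hsep] at h
  unfold PySem.Chars.split? at h
  rw [if_neg (by simp)] at h
  rw [pvSplitOn_eq] at h
  cases hx : PySem.Str.split? config "\n" with
  | none => rw [hx] at h; simp at h
  | some ls =>
    rw [hx] at h
    simp only [Option.map_some, Option.some.injEq] at h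
    have : ls = (ls.map String.toList).map String.ofList := by
      rw [List.map_map]
      simp [Function.comp_def, String.ofList_toList]
    rw [Option.getD_some, this, h]

theorem pvStrip_ofList (v : List Char) :
    PySem.Str.strip (String.ofList v) = String.ofList (PySem.Chars.strip v) := by
  apply String.toList_inj.mp
  rw [PySem.Str.toList_strip, String.toList_ofList, String.toList_ofList]

theorem pvBeq_ofList_empty (v : List Char) :
    (String.ofList v == "") = (decide (v = [])) := by
  by_cases h : v = []
  · subst h; rfl
  · have : String.ofList v ≠ "" := by
      intro hc
      have := congrArg String.toList hc
      rw [String.toList_ofList] at this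
      exact h (by simpa using this)
    simp [this, h]

theorem pvRowsStrA (u : List Char) :
    List.map PySem.Str.strip
        (List.filter (fun row => !(PySem.Str.strip row == "")) ((pvS u).map String.ofList))
      = (pvRows u).map String.ofList := by
  rw [List.filter_map, List.map_map]
  unfold pvRows
  have hfun : (PySem.Str.strip ∘ String.ofList)
      = (fun v => String.ofList (PySem.Chars.strip v)) := funext pvStrip_ofList
  have hcond : ∀ v ∈ pvS u, ((fun row => !(PySem.Str.strip row == "")) ∘ String.ofList) v
      = decide (PySem.Chars.strip v ≠ []) := by
    intro v _
    simp [Function.comp, pvStrip_ofList, pvBeq_ofList_empty]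
  rw [hfun, List.filter_congr hcond, List.filter_map, List.map_map]
  rfl

theorem pvRowsStrB (u : List Char) :
    List.filter (fun line => !(line == ""))
        (((pvS u).map String.ofList).map PySem.Str.strip)
      = (pvRows u).map String.ofList := by
  rw [List.map_map]
  have hfun : (PySem.Str.strip ∘ String.ofList)
      = (fun v => String.ofList (PySem.Chars.strip v)) := funext pvStrip_ofList
  rw [hfun, List.filter_map]
  unfold pvRows
  have hcond : ∀ v ∈ pvS u, ((fun line => !(line == "")) ∘ fun v => String.ofList (PySem.Chars.strip v)) v
      = decide (PySem.Chars.strip v ≠ []) := by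
    intro v _
    simp [Function.comp, pvBeq_ofList_empty]
  rw [List.filter_congr hcond, List.filter_map, List.map_map]
  rfl

theorem pvRows_sep (a t : List Char) :
    pvRows (a ++ '\n' :: t) = pvRows a ++ pvRows t := by
  unfold pvRows
  rw [pvS_sep]
  simp [List.filter_append]

theorem pvRows_join (fs : List (List Char)) :
    pvRows (PySem.Chars.join ['\n'] fs) = fs.flatMap pvRows := by
  induction fs with
  | nil => rfl
  | cons a fs ih =>
    cases fs with
    | nil => simp [PySem.Chars.join, List.intercalate]
    | cons b fs' =>
      have hj : PySem.Chars.join ['\n'] (a :: b :: fs')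
          = a ++ '\n' :: PySem.Chars.join ['\n'] (b :: fs') := by
        simp [PySem.Chars.join, List.intercalate, List.intersperse]
      rw [hj, pvRows_sep, ih]
      rfl

theorem pvFlatMap_filter (p : String → Bool) (g : String → List (List Char))
    (bl : List String) (h : ∀ b ∈ bl, p b = false → g b = []) :
    (bl.filter p).flatMap g = bl.flatMap g := by
  induction bl with
  | nil => rfl
  | cons b bl ih =>
    rw [List.filter_cons]
    by_cases hb : p b
    · rw [if_pos hb]
      simp only [List.flatMap_cons]
      rw [ih (fun c hc => h c (List.mem_cons_of_mem _ hc))]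
    · rw [if_neg hb]
      simp only [List.flatMap_cons, h b (List.mem_cons_self) (by simpa using hb),
        List.nil_append]
      exact ih (fun c hc => h c (List.mem_cons_of_mem _ hc))

theorem pvJoinStr (R : List (List Char)) :
    PySem.Str.join "\n" (R.map String.ofList)
      = String.ofList (PySem.Chars.join ['\n'] R) := by
  apply String.toList_inj.mp
  rw [PySem.Str.toList_join, String.toList_ofList, List.map_map]
  have : String.toList ∘ String.ofList = id := by
    funext v; simp [String.toList_ofList]
  rw [this, List.map_id]
  exact (String.toList_ofList).symm

theorem pvRows_vanish (b : String) (hb : (!(b == "") && !(PySem.Str.strip b == "")) = false) :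
    pvRows b.toList = [] := by
  rcases Bool.and_eq_false_iff.mp hb with h | h
  · have : b = "" := by simpa using h
    subst this; rfl
  · have h1 : PySem.Str.strip b = "" := by simpa using h
    have h2 : PySem.Chars.strip b.toList = [] := by
      have := congrArg String.toList h1
      rwa [PySem.Str.toList_strip] at this
    rw [← pvRows_strip, h2]
    rfl

-- ===== VERDICT (by name: the statement is the Claim_ definition above) =====
theorem merge_buttons_spec : Claim_equal_merge_buttons := by
  intro bl _
  show merge_buttons bl = merge_buttons_alt bl
  have hvanish : ∀ b ∈ bl, (fun b : String => !(b == "") && !(PySem.Str.strip b == "")) b = false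
      → pvRows b.toList = [] := fun b _ hb => pvRows_vanish b hb
  -- A side
  have hA : merge_buttons bl
      = String.ofList (PySem.Chars.join ['\n'] (bl.flatMap (fun b => pvRows b.toList))) := by
    simp only [merge_buttons]
    by_cases hv : ((bl.filter (fun b => !(b == "") && !(PySem.Str.strip b == ""))).map PySem.Str.strip).isEmpty
    · rw [if_pos hv]
      have hfil : bl.filter (fun b => !(b == "") && !(PySem.Str.strip b == "")) = [] :=
        List.map_eq_nil_iff.mp (List.isEmpty_iff.mp hv)
      have hnil : bl.flatMap (fun b => pvRows b.toList) = [] := by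
        apply List.flatMap_eq_nil_iff.mpr
        intro b hb
        exact pvRows_vanish b (Bool.not_eq_true _ ▸ (List.filter_eq_nil_iff.mp hfil b hb))
      rw [hnil]
      rfl
    · rw [if_neg hv]
      simp only [pvSplitStr, PySem.List.foldl_append_if]
      rw [PySem.List.foldl_append_eq_flatMap]
      simp only [List.nil_append, pvRowsStrA, List.flatMap_map, PySem.Str.toList_strip,
        pvRows_strip]
      rw [← List.map_flatMap,
        pvFlatMap_filter _ (fun b => pvRows b.toList) bl hvanish, pvJoinStr]
  have hB : merge_buttons_alt bl
      = String.ofList (PySem.Chars.join ['\n'] (bl.flatMap (fun b => pvRows b.toList))) := by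
    simp only [merge_buttons_alt]
    simp only [pvSplitStr, pvRowsStrB]
    rw [pvJoinStr]
    apply congrArg
    have hc : (PySem.Str.join "\n" (bl.filter (fun b => !(b == "")))).toList
        = PySem.Chars.join ['\n'] ((bl.filter (fun b => !(b == ""))).map String.toList) := by
      rw [PySem.Str.toList_join]
      rfl
    rw [hc, pvRows_join, List.flatMap_map]
    apply congrArg
    exact pvFlatMap_filter _ _ bl (fun b _ hb => by
      have hb' : b = "" := by simpa using hb
      subst hb'
      rfl)
  rw [hA, hB]
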